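-- pv_equiv track=rewrite | github.com/yibo-gh/CASE-24W-Med-Cond-Pred | staToolkit/umlsIcdNameProc.py | __service_getBestDes
-- ===== SOURCE A (Python) =====
-- from typing import Dict, List, Tuple;
--
-- TTY_PRIORITY = [
--         "PN",
--         "PX",
--         "PXQ",
--         'PT',  # Preferred Term
--         'MH',  # MeSH Heading
--         'PN',  # Preferred Name (generic)
--         'PF',  # Preferred Form
--         'SY',  # Synonym
--         'ET',  # Entry Term
--         'HT',  # Hierarchical Term
--         'RPT',  # Related Preferred Term
--         'RHT',  # Related Hierarchical Term
--         'RAB',  # Related Abbreviation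
--         'SSN',  # Short String Name
--     ]
--
-- def __service_getBestDes(d: Dict[str, List[Tuple[str, str]]]) -> Dict[str, str]:
--     ret: Dict[str, str] = dict();
--     for cui, entries in d.items():
--         if not entries:
--             continue;
--
--         sorted_entries = sorted(
--             entries,
--             key=lambda td: TTY_PRIORITY.index(td[0])
--             if td[0] in TTY_PRIORITY
--             else len(TTY_PRIORITY)
--         )
--
--         ret[cui] = sorted_entries[0][1];
--
--     return ret;
-- ===== SOURCE B (Python) =====
-- from typing import Dict, List, Tuple
--
-- TTY_PRIORITY = [
--     "PN", "PX", "PXQ", 'PT', 'MH', 'PN', 'PF', 'SY', 'ET', 'HT',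
--     'RPT', 'RHT', 'RAB', 'SSN',
-- ]
--
--
-- def __service_getBestDes(d: Dict[str, List[Tuple[str, str]]]) -> Dict[str, str]:
--     # rank of each TTY = its FIRST index in TTY_PRIORITY; unknown -> len(TTY_PRIORITY)
--     rank: Dict[str, int] = {}
--     for i, t in enumerate(TTY_PRIORITY):
--         rank.setdefault(t, i)
--     unknown = len(TTY_PRIORITY)
--
--     ret: Dict[str, str] = {}
--     for cui, entries in d.items():
--         if not entries:
--             continue
--         best = entries[0]
--         best_rank = rank.get(best[0], unknown)
--         for td in entries[1:]:
--             r = rank.get(td[0], unknown)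
--             if r < best_rank:       # strict: ties keep the earliest, like sorted's stability
--                 best, best_rank = td, r
--         ret[cui] = best[1]
--     return ret
-- ===== Notes on version B (the rewrite author's own statement) =====
-- stated objective: faster
-- what changed: Replaces the per-CUI full sort (whose key itself rescans TTY_PRIORITY with 'in' + .index for every entry) by a precomputed TTY->rank dict and a single linear best-so-far scan with strict-less updates, preserving sorted's stable tie-breaking.
import Mathlib
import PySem

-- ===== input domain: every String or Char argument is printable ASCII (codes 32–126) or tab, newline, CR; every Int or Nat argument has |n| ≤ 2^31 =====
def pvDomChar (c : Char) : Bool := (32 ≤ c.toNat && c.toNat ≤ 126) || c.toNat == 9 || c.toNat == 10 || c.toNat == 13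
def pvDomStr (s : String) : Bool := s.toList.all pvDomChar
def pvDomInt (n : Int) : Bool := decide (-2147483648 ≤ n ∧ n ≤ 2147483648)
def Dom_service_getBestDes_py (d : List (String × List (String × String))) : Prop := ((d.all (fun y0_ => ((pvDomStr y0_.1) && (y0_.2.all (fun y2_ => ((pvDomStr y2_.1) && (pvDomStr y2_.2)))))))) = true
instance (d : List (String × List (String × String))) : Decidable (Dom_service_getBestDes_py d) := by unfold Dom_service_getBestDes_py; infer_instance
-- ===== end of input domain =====

-- B replaces the per-CUI sort (with a key re-scanning TTY_PRIORITY) by a precomputed rank dict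
-- and one strict-less best-so-far scan per CUI (objective: faster).


-- module-level constant shared by A and B (the Python module's TTY_PRIORITY)
def TTY_PRIORITY : List String :=
  ["PN", "PX", "PXQ", "PT", "MH", "PN", "PF", "SY", "ET", "HT", "RPT", "RHT", "RAB", "SSN"]

-- ===== PORT A =====
-- key = TTY_PRIORITY.index(td[0]) if td[0] in TTY_PRIORITY else len(TTY_PRIORITY)
def ttyKeyA (td : String × String) : Int :=
  if td.1 ∈ TTY_PRIORITY then ((PySem.List.index? TTY_PRIORITY td.1).getD 0 : Nat)
  else (TTY_PRIORITY.length : Nat)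

def service_getBestDes_py (d : List (String × List (String × String))) : List (String × String) :=
  (d.foldl (fun (ret : PySem.Dict String String) p =>
      if p.2 = [] then ret      -- 'if not entries: continue'
      else
        match PySem.List.pyGet? (PySem.List.sorted p.2 ttyKeyA) 0 with   -- sorted_entries[0]
        | some td => ret.insert p.1 td.2
        | none => ret)          -- unreachable: entries nonempty
    PySem.Dict.empty).items

-- ===== PORT B =====
def service_getBestDes_py_alt (d : List (String × List (String × String))) : List (String × String) :=
  let rank : PySem.Dict String Int :=
    (PySem.List.enumerate TTY_PRIORITY).foldl (fun m p => m.setdefault p.2 p.1) PySem.Dict.empty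
  let unknown : Int := (TTY_PRIORITY.length : Nat)
  (d.foldl (fun (ret : PySem.Dict String String) p =>
      match p.2 with
      | [] => ret
      | e :: rest =>
        let best := rest.foldl (fun s td =>
            let r := rank.getD td.1 unknown
            if r < s.2 then (td, r) else s)
          (e, rank.getD e.1 unknown)
        ret.insert p.1 best.1.2)
    PySem.Dict.empty).items

-- ===== PRECONDITION & SPEC =====
def Spec_service_getBestDes_py (d : List (String × List (String × String))) (out : List (String × String)) : Prop := out = service_getBestDes_py_alt d
instance (d : List (String × List (String × String))) (out : List (String × String)) : Decidable (Spec_service_getBestDes_py d out) := by unfold Spec_service_getBestDes_py; infer_instance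

-- ===== CLAIM (what is proved, stated in full; the proofs are below) =====
def Claim_equal_service_getBestDes_py : Prop := ∀ (d : List (String × List (String × String))), Dom_service_getBestDes_py d → Spec_service_getBestDes_py d (service_getBestDes_py d)

-- ===== LEMMAS AND PROOFS =====

-- a setdefault-fold over enumerate computes first-index lookup
theorem getD_rankFold (xs : List String) (t : String) (dflt : Int) :
    ∀ (s : Int) (m : PySem.Dict String Int),
    ((PySem.List.enumerate xs s).foldl (fun m p => m.setdefault p.2 p.1) m).getD t dflt =
      if m.contains t then m.getD t dflt
      else match PySem.List.index? xs t with
           | some i => s + i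
           | none => dflt := by
  induction xs with
  | nil =>
    intro s m
    simp only [PySem.List.enumerate_nil, List.foldl_nil, PySem.List.index?]
    by_cases hct : m.contains t
    · simp [hct]
    · simp only [Bool.not_eq_true] at hct
      simp [hct, PySem.Dict.getD_of_not_contains m dflt hct]
  | cons x xs ih =>
    intro s m
    rw [PySem.List.enumerate_cons]
    simp only [List.foldl_cons]
    by_cases hc : m.contains x
    · rw [PySem.Dict.setdefault_of_contains m s hc, ih]
      by_cases hx : t = x
      · subst hx; simp [hc]
      · rw [PySem.List.index?_cons_of_ne xs (fun h => hx h.symm)]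
        by_cases hct : m.contains t
        · simp [hct]
        · simp only [hct, Bool.false_eq_true, if_false]
          cases h : PySem.List.index? xs t
          · simp
          · simp; omega
    · simp only [Bool.not_eq_true] at hc
      rw [PySem.Dict.setdefault_of_not_contains m s hc, ih]
      by_cases hx : t = x
      · subst hx
        rw [PySem.List.index?_cons_self]
        simp [hc, PySem.Dict.getD_insert_self]
      · have h1 : (m.insert x s).contains t = m.contains t := by
          simp [PySem.Dict.contains_insert, hx]
        have h2 : (m.insert x s).getD t dflt = m.getD t dflt :=
          PySem.Dict.getD_insert_of_ne m s dflt hx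
        rw [h1, h2, PySem.List.index?_cons_of_ne xs (fun h => hx h.symm)]
        by_cases hct : m.contains t
        · simp [hct]
        · simp only [hct, Bool.false_eq_true, if_false]
          cases h : PySem.List.index? xs t
          · simp
          · simp; omega

-- B's rank lookup equals A's sort key
theorem rank_eq_key (td : String × String) :
    ((PySem.List.enumerate TTY_PRIORITY).foldl (fun m p => m.setdefault p.2 p.1)
        PySem.Dict.empty).getD td.1 ((TTY_PRIORITY.length : Nat) : Int) = ttyKeyA td := by
  rw [getD_rankFold]
  unfold ttyKeyA
  by_cases hm : td.1 ∈ TTY_PRIORITY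
  · have hs : (PySem.List.index? TTY_PRIORITY td.1).isSome :=
      (PySem.List.index?_isSome_iff _ _).mpr hm
    obtain ⟨i, hi⟩ := Option.isSome_iff_exists.mp hs
    have hi' : List.idxOf? td.1 TTY_PRIORITY = some i := by simpa using hi
    simp [hi', hm, PySem.Dict.contains_empty]
  · have hn : PySem.List.index? TTY_PRIORITY td.1 = none :=
      (PySem.List.index?_eq_none_iff _ _).mpr hm
    have hn' : List.idxOf? td.1 TTY_PRIORITY = none := by simpa using hn
    simp [hn', hm, PySem.Dict.contains_empty]

-- head of the stable insertion-sort fold = strict-less best-so-far scan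
theorem scan_head {α : Type} (key : α → Int) (l : List α) :
    ∀ (t : List α) (b : α),
    (l.foldl (fun acc x => PySem.List.insertBy (fun a c => decide (key a < key c)) x acc) (b :: t)).head? =
      some (l.foldl (fun s x => if key x < s.2 then (x, key x) else s) (b, key b)).1 := by
  induction l with
  | nil => intro t b; simp
  | cons x l ih =>
    intro t b
    simp only [List.foldl_cons, PySem.List.insertBy]
    by_cases h : key x < key b
    · simp only [h, decide_true, if_true]
      exact ih (b :: t) x
    · simp only [h, decide_false, if_false]
      exact ih _ b

-- the two per-item dict updates agree
theorem step_eq (ret : PySem.Dict String String) (p : String × List (String × String)) :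
    (if p.2 = [] then ret
     else
       match PySem.List.pyGet? (PySem.List.sorted p.2 ttyKeyA) 0 with
       | some td => ret.insert p.1 td.2
       | none => ret) =
    (match p.2 with
     | [] => ret
     | e :: rest =>
       ret.insert p.1
         (rest.foldl (fun s td =>
             if ((PySem.List.enumerate TTY_PRIORITY).foldl (fun m q => m.setdefault q.2 q.1)
                   PySem.Dict.empty).getD td.1 ((TTY_PRIORITY.length : Nat) : Int) < s.2
             then (td, ((PySem.List.enumerate TTY_PRIORITY).foldl (fun m q => m.setdefault q.2 q.1)
                   PySem.Dict.empty).getD td.1 ((TTY_PRIORITY.length : Nat) : Int)) else s)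
           (e, ((PySem.List.enumerate TTY_PRIORITY).foldl (fun m q => m.setdefault q.2 q.1)
                   PySem.Dict.empty).getD e.1 ((TTY_PRIORITY.length : Nat) : Int))).1.2) := by
  rcases p with ⟨cui, entries⟩
  cases entries with
  | nil => simp
  | cons e rest =>
    simp only [reduceCtorEq, if_false]
    rw [PySem.List.sorted_eq_foldl_insertBy]
    have h0 : PySem.List.insertBy (fun a c => decide (ttyKeyA a < ttyKeyA c)) e [] = [e] := by
      simp [PySem.List.insertBy]
    rw [List.foldl_cons, h0]
    have hh := scan_head ttyKeyA rest [] e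
    set L := rest.foldl
        (fun acc x => PySem.List.insertBy (fun a c => decide (ttyKeyA a < ttyKeyA c)) x acc) [e] with hL
    obtain ⟨bst, tl, hcons⟩ : ∃ bst tl, L = bst :: tl := by
      cases hLc : L with
      | nil => rw [hLc] at hh; simp at hh
      | cons a b => exact ⟨a, b, rfl⟩
    have hb : bst = (rest.foldl (fun s x => if ttyKeyA x < s.2 then (x, ttyKeyA x) else s)
        (e, ttyKeyA e)).1 := by
      rw [hcons] at hh; simpa using hh
    rw [hcons]
    have hget : PySem.List.pyGet? (bst :: tl) 0 = some bst := by
      simp [PySem.List.pyGet?, PySem.List.pyIdx?]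
    rw [hget]
    have hrank : (fun (s : (String × String) × Int) (td : String × String) =>
          if ((PySem.List.enumerate TTY_PRIORITY).foldl (fun m q => m.setdefault q.2 q.1)
                PySem.Dict.empty).getD td.1 ((TTY_PRIORITY.length : Nat) : Int) < s.2
          then (td, ((PySem.List.enumerate TTY_PRIORITY).foldl (fun m q => m.setdefault q.2 q.1)
                PySem.Dict.empty).getD td.1 ((TTY_PRIORITY.length : Nat) : Int)) else s) =
        (fun s td => if ttyKeyA td < s.2 then (td, ttyKeyA td) else s) := by
      funext s td; rw [rank_eq_key td]
    rw [hrank, rank_eq_key e, hb]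

-- ===== VERDICT (by name: the statement is the Claim_ definition above) =====
theorem service_getBestDes_py_spec : Claim_equal_service_getBestDes_py := by
  intro d _
  unfold Spec_service_getBestDes_py service_getBestDes_py service_getBestDes_py_alt
  congr 1
  exact List.foldl_ext _ _ _ (fun ret p _ => step_eq ret p)
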